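-- pv_equiv track=rewrite | github.com/Njoro24/My-ClimateBE | app/api/routes/explainable_ai.py | _extract_decision_factors
-- ===== SOURCE A (Python) =====
-- from typing import Dict, Any, List, Optional
--
-- def _extract_decision_factors(reasoning: List[str]) -> List[str]:
--     """Extract key decision factors from reasoning"""
--     factors = []
--     for reason in reasoning:
--         if "trust score" in reason.lower():
--             factors.append("User Trust Level")
--         elif "evidence" in reason.lower():
--             factors.append("Evidence Quality")
--         elif "gps" in reason.lower():
--             factors.append("Location Verification")
--         elif "timestamp" in reason.lower():
--             factors.append("Timing Validation")
--     return factors or ["Standard Criteria"]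
-- ===== SOURCE B (Python) =====
-- _RULES = [
--     ("trust score", "User Trust Level"),
--     ("evidence", "Evidence Quality"),
--     ("gps", "Location Verification"),
--     ("timestamp", "Timing Validation"),
-- ]
--
-- def _extract_decision_factors(reasoning):
--     """Rule-major staged passes: each rule fills still-empty slots of a
--     parallel array; a final pass drops unfilled slots."""
--     lowered = [r.lower() for r in reasoning]
--     slots = [None] * len(lowered)
--     for kw, label in _RULES:
--         slots = [label if slot is None and kw in s else slot
--                  for slot, s in zip(slots, lowered)]
--     factors = [f for f in slots if f is not None]
--     return factors or ["Standard Criteria"]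
-- ===== Notes on version B (the rewrite author's own statement) =====
-- stated objective: alternative
-- what changed: Inverts the traversal: instead of A's single reason-major pass with an elif chain, B makes one vectorized pass per rule over a parallel slots array (a rule fills only still-empty slots, so earlier rules keep priority), then a final filter pass drops unmatched slots.
import Mathlib
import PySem

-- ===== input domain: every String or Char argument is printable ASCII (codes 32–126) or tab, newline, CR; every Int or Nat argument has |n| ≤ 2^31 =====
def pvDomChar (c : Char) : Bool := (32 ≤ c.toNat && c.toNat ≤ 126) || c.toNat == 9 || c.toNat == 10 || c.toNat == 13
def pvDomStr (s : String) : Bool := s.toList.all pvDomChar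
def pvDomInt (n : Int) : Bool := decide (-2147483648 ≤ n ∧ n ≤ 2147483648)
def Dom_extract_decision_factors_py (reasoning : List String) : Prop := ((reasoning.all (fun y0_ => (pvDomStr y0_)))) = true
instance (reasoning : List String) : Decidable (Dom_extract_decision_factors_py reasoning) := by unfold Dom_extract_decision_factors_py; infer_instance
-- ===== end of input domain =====

-- B inverts the traversal: one pass per rule filling still-empty slots of a parallel array, then a filter pass (alternative; same cost).


-- ===== PORT A =====
def extract_decision_factors_py (reasoning : List String) : List String :=
  let factors := reasoning.foldl (fun factors reason =>
    if PySem.Str.isIn "trust score" (PySem.Str.lower reason) then factors ++ ["User Trust Level"]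
    else if PySem.Str.isIn "evidence" (PySem.Str.lower reason) then factors ++ ["Evidence Quality"]
    else if PySem.Str.isIn "gps" (PySem.Str.lower reason) then factors ++ ["Location Verification"]
    else if PySem.Str.isIn "timestamp" (PySem.Str.lower reason) then factors ++ ["Timing Validation"]
    else factors) []
  if factors = [] then ["Standard Criteria"] else factors

-- ===== PORT B =====
-- B: for each (keyword,label) rule in order, a vectorized pass fills still-empty slots
def pvRules : List (String × String) :=
  [("trust score", "User Trust Level"), ("evidence", "Evidence Quality"),
   ("gps", "Location Verification"), ("timestamp", "Timing Validation")]

def extract_decision_factors_py_alt (reasoning : List String) : List String :=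
  let lowered := reasoning.map PySem.Str.lower
  let slots := pvRules.foldl (fun slots r =>
      (slots.zip lowered).map (fun p =>
        if p.1 = none ∧ PySem.Str.isIn r.1 p.2 then some r.2 else p.1))
    (List.replicate lowered.length (none : Option String))
  let factors := slots.filterMap id
  if factors = [] then ["Standard Criteria"] else factors

-- ===== PRECONDITION & SPEC =====
def Spec_extract_decision_factors_py (reasoning : List String) (out : List String) : Prop := out = extract_decision_factors_py_alt reasoning
instance (reasoning : List String) (out : List String) : Decidable (Spec_extract_decision_factors_py reasoning out) := by unfold Spec_extract_decision_factors_py; infer_instance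

-- ===== CLAIM (what is proved, stated in full; the proofs are below) =====
def Claim_equal_extract_decision_factors_py : Prop := ∀ (reasoning : List String), Dom_extract_decision_factors_py reasoning → Spec_extract_decision_factors_py reasoning (extract_decision_factors_py reasoning)

-- ===== LEMMAS AND PROOFS =====
-- the per-string classification both programs compute (A via the elif chain, B via rule passes)
def pvChain (s : String) : Option String :=
  if PySem.Str.isIn "trust score" s then some "User Trust Level"
  else if PySem.Str.isIn "evidence" s then some "Evidence Quality"
  else if PySem.Str.isIn "gps" s then some "Location Verification"
  else if PySem.Str.isIn "timestamp" s then some "Timing Validation"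
  else none

-- one rule pass on slots that are a pointwise function of lowered stays a pointwise function
lemma pass_map (kw label : String) (f : String → Option String) (lowered : List String) :
    ((lowered.map f).zip lowered).map (fun p =>
        if p.1 = none ∧ PySem.Str.isIn kw p.2 then some label else p.1)
    = lowered.map (fun s => if f s = none ∧ PySem.Str.isIn kw s then some label else f s) := by
  induction lowered with
  | nil => simp
  | cons x xs ih => simp only [List.map_cons, List.zip_cons_cons, ih]

-- after the four rule passes, slots = pointwise chain classification
lemma slots_eq (lowered : List String) :
    pvRules.foldl (fun slots r =>
      (slots.zip lowered).map (fun p =>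
        if p.1 = none ∧ PySem.Str.isIn r.1 p.2 then some r.2 else p.1))
      (List.replicate lowered.length (none : Option String))
    = lowered.map pvChain := by
  have h0 : List.replicate lowered.length (none : Option String)
      = lowered.map (fun _ => (none : Option String)) := by simp
  simp only [pvRules, List.foldl_cons, List.foldl_nil, h0, pass_map]
  refine List.map_congr_left (fun s _ => ?_)
  simp only [pvChain]
  split_ifs <;> simp_all

-- A's accumulator equals acc ++ the chain classification of each element
lemma foldA_eq (reasoning : List String) (acc : List String) :
    reasoning.foldl (fun factors reason =>
      if PySem.Str.isIn "trust score" (PySem.Str.lower reason) then factors ++ ["User Trust Level"]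
      else if PySem.Str.isIn "evidence" (PySem.Str.lower reason) then factors ++ ["Evidence Quality"]
      else if PySem.Str.isIn "gps" (PySem.Str.lower reason) then factors ++ ["Location Verification"]
      else if PySem.Str.isIn "timestamp" (PySem.Str.lower reason) then factors ++ ["Timing Validation"]
      else factors) acc
    = acc ++ reasoning.filterMap (fun r => pvChain (PySem.Str.lower r)) := by
  induction reasoning generalizing acc with
  | nil => simp
  | cons r rs ih =>
    simp only [List.foldl_cons, List.filterMap_cons, ih, pvChain]
    split_ifs <;> simp

-- ===== VERDICT (by name: the statement is the Claim_ definition above) =====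
theorem extract_decision_factors_py_spec : Claim_equal_extract_decision_factors_py := by
  intro reasoning _
  unfold Spec_extract_decision_factors_py extract_decision_factors_py extract_decision_factors_py_alt
  simp only [foldA_eq, slots_eq, List.nil_append, List.filterMap_map]
  simp [Function.comp]
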